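-- pv_equiv track=rewrite | github.com/arunabhamaity148-cell/coindcx-signal-bot | risk_manager.py | check_correlation
-- ===== SOURCE A (Python) =====
-- from typing import Dict, Optional, Tuple
--
-- def check_correlation(pair: str, active_positions: Dict) -> Tuple[bool, str]:
--     """
--     Check if new position is correlated with existing ones
--     Prevents over-exposure to same coin
--     """
--
--     coin = pair.replace('USDT', '')
--
--     # Check if same coin in different mode
--     for active_pair in active_positions:
--         active_coin = active_pair.replace('USDT', '')
--
--         if coin == active_coin:
--             return False, f"Already have position in {active_coin}"
--
--     # Check highly correlated pairs (simplified)
--     CORRELATION_GROUPS = [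
--         ['BTC', 'ETH'],  # Major crypto correlation
--         ['SOL', 'AVAX', 'ATOM'],  # L1 platforms
--         ['MATIC', 'ARB', 'OP'],  # L2 solutions
--     ]
--
--     for group in CORRELATION_GROUPS:
--         if coin in group:
--             for active_pair in active_positions:
--                 active_coin = active_pair.replace('USDT', '')
--                 if active_coin in group and active_coin != coin:
--                     return False, f"Correlated with {active_coin}"
--
--     return True, "No correlation issues"
-- ===== SOURCE B (Python) =====
-- CORRELATION_GROUPS = [
--     ['BTC', 'ETH'],
--     ['SOL', 'AVAX', 'ATOM'],
--     ['MATIC', 'ARB', 'OP'],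
-- ]
--
--
-- def _same_group(a, b):
--     return any(a in g and b in g for g in CORRELATION_GROUPS)
--
--
-- def check_correlation(pair: str, active_positions):
--     """Single fused pass: return at the first exact coin match, while
--     accumulating the first correlated coin to report if no exact match occurs."""
--     coin = pair.replace('USDT', '')
--     corr = None
--     for active_pair in active_positions:
--         active_coin = active_pair.replace('USDT', '')
--         if active_coin == coin:
--             return False, f"Already have position in {active_coin}"
--         if corr is None and _same_group(coin, active_coin):
--             corr = active_coin
--     if corr is not None:
--         return False, f"Correlated with {corr}"
--     return True, "No correlation issues"
-- ===== Notes on version B (the rewrite author's own statement) =====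
-- stated objective: simpler
-- what changed: Replaces A's two staged scans (exact-match pass, then a loop over the group table with an inner rescan of positions) by one fused pass over active_positions that returns at the first exact match and accumulates the first correlated coin via a symmetric same_group predicate.
import Mathlib
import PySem

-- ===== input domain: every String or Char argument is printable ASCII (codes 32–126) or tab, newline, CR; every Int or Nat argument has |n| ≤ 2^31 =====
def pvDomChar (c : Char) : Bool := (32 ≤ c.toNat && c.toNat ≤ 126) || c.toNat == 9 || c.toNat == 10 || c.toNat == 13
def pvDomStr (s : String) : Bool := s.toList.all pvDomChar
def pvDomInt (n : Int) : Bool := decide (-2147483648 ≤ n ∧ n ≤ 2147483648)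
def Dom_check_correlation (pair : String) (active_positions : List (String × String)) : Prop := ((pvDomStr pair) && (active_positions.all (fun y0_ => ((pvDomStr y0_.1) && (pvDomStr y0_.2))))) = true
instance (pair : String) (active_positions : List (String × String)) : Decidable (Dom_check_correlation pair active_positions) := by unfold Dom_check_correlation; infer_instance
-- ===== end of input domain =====

-- B fuses A's two staged scans into one pass over active_positions that returns at
-- the first exact match and accumulates the first correlated coin (simpler; same results).

-- ===== PORT A =====
def pyRepl (s : String) : String := PySem.Str.replace s "USDT" ""

def ccGroups : List (List String) :=
  [["BTC", "ETH"], ["SOL", "AVAX", "ATOM"], ["MATIC", "ARB", "OP"]]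

-- first loop of A: first active coin equal to `coin`
def ccLoop1 (coin : String) : List (String × String) → Option (Bool × String)
  | [] => none
  | p :: rest =>
    let ac := pyRepl p.1
    if coin = ac then some (false, "Already have position in " ++ ac)
    else ccLoop1 coin rest

-- inner loop of A's second phase over one group
def ccLoop2 (coin : String) (group : List String) : List (String × String) → Option (Bool × String)
  | [] => none
  | p :: rest =>
    let ac := pyRepl p.1
    if ac ∈ group ∧ ac ≠ coin then some (false, "Correlated with " ++ ac)
    else ccLoop2 coin group rest

-- outer loop of A's second phase over the groups
def ccLoopG (coin : String) (aps : List (String × String)) : List (List String) → Option (Bool × String)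
  | [] => none
  | g :: gs =>
    if coin ∈ g then
      match ccLoop2 coin g aps with
      | some r => some r
      | none => ccLoopG coin aps gs
    else ccLoopG coin aps gs

def check_correlation (pair : String) (active_positions : List (String × String)) : Bool × String :=
  let coin := pyRepl pair
  match ccLoop1 coin active_positions with
  | some r => r
  | none =>
    match ccLoopG coin active_positions ccGroups with
    | some r => r
    | none => (true, "No correlation issues")

-- ===== PORT B =====
def altGroups : List (List String) :=
  [["BTC", "ETH"], ["SOL", "AVAX", "ATOM"], ["MATIC", "ARB", "OP"]]

-- _same_group(a, b) = any(a in g and b in g for g in CORRELATION_GROUPS)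
def sameGroup (a b : String) : Bool :=
  altGroups.any (fun g => g.contains a && g.contains b)

-- B's single fused loop, carrying the first correlated coin seen so far
def altLoop (coin : String) (corr : Option String) : List (String × String) → Bool × String
  | [] =>
    match corr with
    | some c => (false, "Correlated with " ++ c)
    | none => (true, "No correlation issues")
  | p :: rest =>
    let ac := pyRepl p.1
    if ac = coin then (false, "Already have position in " ++ ac)
    else altLoop coin (if corr.isNone && sameGroup coin ac then some ac else corr) rest

def check_correlation_alt (pair : String) (active_positions : List (String × String)) : Bool × String :=
  let coin := pyRepl pair
  altLoop coin none active_positions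

-- ===== PRECONDITION & SPEC =====
def Spec_check_correlation (pair : String) (active_positions : List (String × String)) (out : Bool × String) : Prop := out = check_correlation_alt pair active_positions
instance (pair : String) (active_positions : List (String × String)) (out : Bool × String) : Decidable (Spec_check_correlation pair active_positions out) := by unfold Spec_check_correlation; infer_instance

-- ===== CLAIM (what is proved, stated in full; the proofs are below) =====
def Claim_equal_check_correlation : Prop := ∀ (pair : String) (active_positions : List (String × String)), Dom_check_correlation pair active_positions → Spec_check_correlation pair active_positions (check_correlation pair active_positions)

-- ===== LEMMAS AND PROOFS =====

-- proof helper: first active coin correlated with `coin` (B's accumulator, directly)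
def findCorr (coin : String) : List (String × String) → Option String
  | [] => none
  | p :: rest =>
    let ac := pyRepl p.1
    if sameGroup coin ac then some ac else findCorr coin rest

def finish : Option String → Bool × String
  | some c => (false, "Correlated with " ++ c)
  | none => (true, "No correlation issues")

-- B's loop returns A's exact-match result when there is one
theorem altLoop_exact (coin : String) (aps : List (String × String)) (r : Bool × String)
    (h : ccLoop1 coin aps = some r) (corr : Option String) :
    altLoop coin corr aps = r := by
  induction aps generalizing corr with
  | nil => simp [ccLoop1] at h
  | cons p rest ih =>
    simp only [ccLoop1] at h
    simp only [altLoop]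
    by_cases he : pyRepl p.1 = coin
    · rw [if_pos he]
      rw [if_pos he.symm] at h
      cases h; rw [he]
    · rw [if_neg he]
      rw [if_neg (fun hh => he hh.symm)] at h
      exact ih h _

-- with no exact match, B's loop finishes with its accumulator or the first correlated coin
theorem altLoop_noexact (coin : String) (aps : List (String × String))
    (h : ccLoop1 coin aps = none) (corr : Option String) :
    altLoop coin corr aps = finish (corr.or (findCorr coin aps)) := by
  induction aps generalizing corr with
  | nil => cases corr <;> rfl
  | cons p rest ih =>
    simp only [ccLoop1] at h
    by_cases he : coin = pyRepl p.1
    · rw [if_pos he] at h; cases h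
    rw [if_neg he] at h
    simp only [altLoop, findCorr]
    rw [if_neg (fun hh => he hh.symm)]
    rw [ih h]
    cases corr with
    | none => by_cases hs : sameGroup coin (pyRepl p.1) = true <;> simp [hs]
    | some c => simp

-- with no exact match, A's inner scan of one group equals findCorr,
-- provided membership in that group coincides with sameGroup coin ·
theorem ccLoop2_findCorr (coin : String) (g : List String)
    (hg : ∀ ac : String, (ac ∈ g) ↔ sameGroup coin ac = true)
    (aps : List (String × String)) (h : ccLoop1 coin aps = none) :
    ccLoop2 coin g aps = (findCorr coin aps).map (fun c => (false, "Correlated with " ++ c)) := by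
  induction aps with
  | nil => rfl
  | cons p rest ih =>
    simp only [ccLoop1] at h
    by_cases he : coin = pyRepl p.1
    · rw [if_pos he] at h; cases h
    rw [if_neg he] at h
    simp only [ccLoop2, findCorr]
    by_cases hm : sameGroup coin (pyRepl p.1) = true
    · rw [if_pos ⟨(hg _).mpr hm, fun hh => he hh.symm⟩, if_pos hm]; rfl
    · rw [if_neg (fun hc => hm ((hg _).mp hc.1)), if_neg hm]
      exact ih h

-- A's whole body equals B's whole body, for an arbitrary coin
theorem main_eq (coin : String) (aps : List (String × String)) :
    (match ccLoop1 coin aps with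
     | some r => r
     | none =>
       match ccLoopG coin aps ccGroups with
       | some r => r
       | none => (true, "No correlation issues")) = altLoop coin none aps := by
  cases hl : ccLoop1 coin aps with
  | some r => rw [altLoop_exact coin aps r hl none]
  | none =>
    rw [altLoop_noexact coin aps hl none, Option.none_or]
    by_cases h1 : coin = "BTC"
    · subst h1
      rw [show ccLoopG "BTC" aps ccGroups =
            match ccLoop2 "BTC" ["BTC","ETH"] aps with
            | some r => some r | none => none from by
          simp only [ccLoopG, ccGroups]
          rw [if_pos (by decide), if_neg (by decide), if_neg (by decide)]]
      rw [ccLoop2_findCorr "BTC" ["BTC","ETH"] (fun ac => by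
            simp [sameGroup, altGroups]) aps hl]
      cases findCorr "BTC" aps <;> rfl
    by_cases h2 : coin = "ETH"
    · subst h2
      rw [show ccLoopG "ETH" aps ccGroups =
            match ccLoop2 "ETH" ["BTC","ETH"] aps with
            | some r => some r | none => none from by
          simp only [ccLoopG, ccGroups]
          rw [if_pos (by decide), if_neg (by decide), if_neg (by decide)]]
      rw [ccLoop2_findCorr "ETH" ["BTC","ETH"] (fun ac => by
            simp [sameGroup, altGroups]) aps hl]
      cases findCorr "ETH" aps <;> rfl
    by_cases h3 : coin = "SOL"
    · subst h3
      rw [show ccLoopG "SOL" aps ccGroups =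
            match ccLoop2 "SOL" ["SOL","AVAX","ATOM"] aps with
            | some r => some r | none => none from by
          simp only [ccLoopG, ccGroups]
          rw [if_neg (by decide), if_pos (by decide), if_neg (by decide)]]
      rw [ccLoop2_findCorr "SOL" ["SOL","AVAX","ATOM"] (fun ac => by
            simp [sameGroup, altGroups]) aps hl]
      cases findCorr "SOL" aps <;> rfl
    by_cases h4 : coin = "AVAX"
    · subst h4
      rw [show ccLoopG "AVAX" aps ccGroups =
            match ccLoop2 "AVAX" ["SOL","AVAX","ATOM"] aps with
            | some r => some r | none => none from by
          simp only [ccLoopG, ccGroups]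
          rw [if_neg (by decide), if_pos (by decide), if_neg (by decide)]]
      rw [ccLoop2_findCorr "AVAX" ["SOL","AVAX","ATOM"] (fun ac => by
            simp [sameGroup, altGroups]) aps hl]
      cases findCorr "AVAX" aps <;> rfl
    by_cases h5 : coin = "ATOM"
    · subst h5
      rw [show ccLoopG "ATOM" aps ccGroups =
            match ccLoop2 "ATOM" ["SOL","AVAX","ATOM"] aps with
            | some r => some r | none => none from by
          simp only [ccLoopG, ccGroups]
          rw [if_neg (by decide), if_pos (by decide), if_neg (by decide)]]
      rw [ccLoop2_findCorr "ATOM" ["SOL","AVAX","ATOM"] (fun ac => by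
            simp [sameGroup, altGroups]) aps hl]
      cases findCorr "ATOM" aps <;> rfl
    by_cases h6 : coin = "MATIC"
    · subst h6
      rw [show ccLoopG "MATIC" aps ccGroups =
            match ccLoop2 "MATIC" ["MATIC","ARB","OP"] aps with
            | some r => some r | none => none from by
          simp only [ccLoopG, ccGroups]
          rw [if_neg (by decide), if_neg (by decide), if_pos (by decide)]]
      rw [ccLoop2_findCorr "MATIC" ["MATIC","ARB","OP"] (fun ac => by
            simp [sameGroup, altGroups]) aps hl]
      cases findCorr "MATIC" aps <;> rfl
    by_cases h7 : coin = "ARB"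
    · subst h7
      rw [show ccLoopG "ARB" aps ccGroups =
            match ccLoop2 "ARB" ["MATIC","ARB","OP"] aps with
            | some r => some r | none => none from by
          simp only [ccLoopG, ccGroups]
          rw [if_neg (by decide), if_neg (by decide), if_pos (by decide)]]
      rw [ccLoop2_findCorr "ARB" ["MATIC","ARB","OP"] (fun ac => by
            simp [sameGroup, altGroups]) aps hl]
      cases findCorr "ARB" aps <;> rfl
    by_cases h8 : coin = "OP"
    · subst h8
      rw [show ccLoopG "OP" aps ccGroups =
            match ccLoop2 "OP" ["MATIC","ARB","OP"] aps with
            | some r => some r | none => none from by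
          simp only [ccLoopG, ccGroups]
          rw [if_neg (by decide), if_neg (by decide), if_pos (by decide)]]
      rw [ccLoop2_findCorr "OP" ["MATIC","ARB","OP"] (fun ac => by
            simp [sameGroup, altGroups]) aps hl]
      cases findCorr "OP" aps <;> rfl
    -- coin is in no group: A's outer loop yields none and findCorr yields none
    · have hgs : ∀ ac : String, sameGroup coin ac = false := fun ac => by
        simp [sameGroup, altGroups, h1, h2, h3, h4, h5, h6, h7, h8]
      have hfc : ∀ l : List (String × String), findCorr coin l = none := by
        intro l
        induction l with
        | nil => rfl
        | cons q rest ih => simp [findCorr, hgs, ih]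
      have hG : ccLoopG coin aps ccGroups = none := by
        simp only [ccLoopG, ccGroups]
        rw [if_neg (by simp [h1, h2]), if_neg (by simp [h3, h4, h5]),
            if_neg (by simp [h6, h7, h8])]
      rw [hG, hfc]; rfl

-- ===== VERDICT (by name: the statement is the Claim_ definition above) =====
theorem check_correlation_spec : Claim_equal_check_correlation := by
  intro pair aps _
  show check_correlation pair aps = check_correlation_alt pair aps
  exact main_eq (pyRepl pair) aps
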